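-- pv_equiv track=rewrite | github.com/NUSTM/SMSA | tools.py | cut_sentence
-- ===== SOURCE A (Python) =====
-- def cut_sentence(block,puncs_list):
--     '''按照标点分割子句'''
--     start = 0
--     i = 0                                       #记录每个字符的位置
--     sents = []
--     ct = 0
--     for word in block:
--         if word in puncs_list:
--             lst = block[start:i+1]
--             if len(lst)==1:
--                 if ct>=1:
--                     sents[ct-1].append(lst[0])
--             else:
--                 sents.append(block[start:i+1])
--                 ct += 1
--             start = i + 1                       #start标记到下一句的开头
--             i += 1
--         else:
--             i += 1                              #若不是标点符号，则字符位置继续前移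
--     if start < len(block):
--         sents.append(block[start:])             #这是为了处理文本末尾没有标点符号的情况
--     return sents
-- ===== SOURCE B (Python) =====
-- def cut_sentence(block, puncs_list):
--     # stage 1: accumulate tokens into a current segment, flushing at each punctuation mark
--     segs = []
--     cur = []
--     for w in block:
--         cur.append(w)
--         if w in puncs_list:
--             segs.append(cur)
--             cur = []
--     # stage 2: merge lone-punctuation segments into the previous sentence (drop if none)
--     sents = []
--     for seg in segs:
--         if len(seg) == 1:
--             if sents:
--                 sents[-1].extend(seg)
--         else:
--             sents.append(seg)
--     if cur:
--         sents.append(cur)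
--     return sents
-- ===== Notes on version B (the rewrite author's own statement) =====
-- stated objective: alternative
-- what changed: A's single slicing pass that tracks start/index/counter over the block is replaced by two stages: a flush pass that builds each segment token by token with no index arithmetic or slicing, then a separate merge pass over the finished segment list that folds lone-punctuation segments into the preceding sentence.
import Mathlib
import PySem

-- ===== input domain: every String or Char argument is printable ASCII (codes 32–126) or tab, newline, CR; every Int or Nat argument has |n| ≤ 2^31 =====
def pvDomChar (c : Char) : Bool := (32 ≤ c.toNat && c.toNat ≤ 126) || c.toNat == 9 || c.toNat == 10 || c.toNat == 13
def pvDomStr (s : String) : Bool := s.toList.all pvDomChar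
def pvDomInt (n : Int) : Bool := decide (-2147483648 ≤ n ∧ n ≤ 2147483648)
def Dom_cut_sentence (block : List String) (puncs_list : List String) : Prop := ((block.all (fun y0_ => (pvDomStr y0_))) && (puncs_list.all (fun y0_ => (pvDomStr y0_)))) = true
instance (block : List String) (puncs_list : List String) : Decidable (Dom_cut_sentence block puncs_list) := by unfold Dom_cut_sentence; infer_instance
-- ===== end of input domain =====

-- B replaces A's single slicing pass (start/index/counter bookkeeping) by two stages: build each
-- segment token by token (no slicing), then a separate merge pass over the finished segment list;
-- objective: alternative decomposition of the same cost.

-- ===== PORT A =====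
-- the for-loop of A: state (start, i, sents, ct); returns final (start, sents)
def cutA_go (block : List String) (puncs_list : List String) :
    List String → Int → Int → List (List String) → Int → Int × List (List String)
  | [], start, _i, sents, _ct => (start, sents)
  | word :: rest, start, i, sents, ct =>
    if word ∈ puncs_list then
      -- lst = block[start:i+1]
      if (PySem.List.slice block (some start) (some (i+1))).length = 1 then
        if ct ≥ 1 then
          -- sents[ct-1].append(lst[0]); exact: under the guard ct-1 ≥ 0, so no negative wraparound,
          -- and lst[0] exists since lst has length 1
          cutA_go block puncs_list rest (i+1) (i+1)
            (sents.modify (ct-1).toNat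
              (fun s => s ++ [(PySem.List.slice block (some start) (some (i+1))).headD ""])) ct
        else
          cutA_go block puncs_list rest (i+1) (i+1) sents ct
      else
        cutA_go block puncs_list rest (i+1) (i+1)
          (sents ++ [PySem.List.slice block (some start) (some (i+1))]) (ct+1)
    else
      cutA_go block puncs_list rest start (i+1) sents ct

def cut_sentence (block : List String) (puncs_list : List String) : List (List String) :=
  let r := cutA_go block puncs_list block 0 0 [] 0
  if r.1 < (block.length : Int) then r.2 ++ [PySem.List.slice block (some r.1) none] else r.2

-- ===== PORT B =====
-- stage 1 of B: accumulate tokens into cur, flushing cur++[w] into segs at each punctuation mark;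
-- returns (segs, leftover cur)
def cutB_flush (puncs_list : List String) :
    List String → List String → List (List String) → List (List String) × List String
  | [], cur, segs => (segs, cur)
  | w :: rest, cur, segs =>
    if w ∈ puncs_list then cutB_flush puncs_list rest [] (segs ++ [cur ++ [w]])
    else cutB_flush puncs_list rest (cur ++ [w]) segs

-- stage 2 of B: fold lone-punctuation segments into the previous sentence (sents[-1].extend(seg))
def cutB_merge : List (List String) → List (List String) → List (List String)
  | [], sents => sents
  | seg :: rest, sents =>
    if seg.length = 1 then
      if sents ≠ [] then cutB_merge rest (sents.dropLast ++ [sents.getLastD [] ++ seg])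
      else cutB_merge rest sents
    else cutB_merge rest (sents ++ [seg])

def cut_sentence_alt (block : List String) (puncs_list : List String) : List (List String) :=
  let r := cutB_flush puncs_list block [] []
  let sents := cutB_merge r.1 []
  if r.2 ≠ [] then sents ++ [r.2] else sents

-- ===== PRECONDITION & SPEC =====
def Spec_cut_sentence (block : List String) (puncs_list : List String) (out : List (List String)) : Prop := out = cut_sentence_alt block puncs_list
instance (block : List String) (puncs_list : List String) (out : List (List String)) : Decidable (Spec_cut_sentence block puncs_list out) := by unfold Spec_cut_sentence; infer_instance

-- ===== CLAIM (what is proved, stated in full; the proofs are below) =====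
def Claim_equal_cut_sentence : Prop := ∀ (block : List String) (puncs_list : List String), Dom_cut_sentence block puncs_list → Spec_cut_sentence block puncs_list (cut_sentence block puncs_list)

-- ===== LEMMAS AND PROOFS =====

-- appending to the last element via modify = dropLast ++ [last ++ [x]]
lemma modify_last_eq {α : Type} (d : α) (f : α → α) :
    ∀ (l : List α), l ≠ [] → l.modify (l.length - 1) f = l.dropLast ++ [f (l.getLastD d)]
  | [], h => absurd rfl h
  | [a], _ => by simp [List.modify]
  | a :: b :: t, _ => by
    have ih := modify_last_eq d f (b :: t) (by simp)
    simp only [List.length_cons, Nat.add_sub_cancel] at ih ⊢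
    simpa [List.modify_cons, List.dropLast_cons₂, List.getLastD_cons] using ih

-- flush's segment accumulator factors out
lemma flush_acc (p : List String) :
    ∀ (l cur : List String) (segs : List (List String)),
      cutB_flush p l cur segs
        = (segs ++ (cutB_flush p l cur []).1, (cutB_flush p l cur []).2)
  | [], cur, segs => by simp [cutB_flush]
  | w :: rest, cur, segs => by
    by_cases hw : w ∈ p
    · rw [cutB_flush, if_pos hw, cutB_flush, if_pos hw,
        flush_acc p rest [] (segs ++ [cur ++ [w]]), flush_acc p rest [] ([] ++ [cur ++ [w]])]
      simp
    · rw [cutB_flush, if_neg hw, cutB_flush, if_neg hw]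
      exact flush_acc p rest (cur ++ [w]) segs

-- extending a slice by the element sitting at its right end
lemma slice_snoc (block : List String) (w : String) (rest : List String)
    (s k : Nat) (hsk : s ≤ k) (hdrop : block.drop k = w :: rest) :
    PySem.List.slice block (some ((k+1 : Nat) : Int)) (some ((k+1 : Nat) : Int)) = [] ∧
    PySem.List.slice block (some ((s : Nat) : Int)) (some ((k+1 : Nat) : Int))
      = PySem.List.slice block (some ((s : Nat) : Int)) (some ((k : Nat) : Int)) ++ [w] := by
  have hk : block[k]? = some w := by
    have h : (List.drop k block)[0]? = block[k + 0]? := List.getElem?_drop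
    rw [hdrop] at h
    simpa using h.symm
  constructor
  · rw [PySem.List.slice_natCast]; simp
  · rw [PySem.List.slice_natCast, PySem.List.slice_natCast]
    have h1 : k + 1 - s = (k - s) + 1 := by omega
    rw [h1, List.take_add_one]
    have h2 : (block.drop s)[k - s]? = some w := by
      have h : (List.drop s block)[k - s]? = block[s + (k - s)]? := List.getElem?_drop
      rw [h]
      have : s + (k - s) = k := by omega
      rw [this, hk]
    simp [h2]

-- the main correspondence: A's loop state vs B's flush+merge, with cur = block[s:k]
lemma go_eq (block p : List String) :
    ∀ (l : List String) (k s : Nat) (sents : List (List String)),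
      s ≤ k → k ≤ block.length → block.drop k = l →
      (cutA_go block p l ((s : Nat) : Int) ((k : Nat) : Int) sents (sents.length : Int)
        = ((((block.length - (cutB_flush p l (PySem.List.slice block (some ((s:Nat):Int)) (some ((k:Nat):Int))) []).2.length : Nat)) : Int),
           cutB_merge (cutB_flush p l (PySem.List.slice block (some ((s:Nat):Int)) (some ((k:Nat):Int))) []).1 sents))
      ∧ (cutB_flush p l (PySem.List.slice block (some ((s:Nat):Int)) (some ((k:Nat):Int))) []).2
          = block.drop (block.length - (cutB_flush p l (PySem.List.slice block (some ((s:Nat):Int)) (some ((k:Nat):Int))) []).2.length)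
  | [], k, s, sents, hsk, hkle, hdrop => by
    have hk : k = block.length := by
      have := congrArg List.length hdrop; simp at this; omega
    subst hk
    rw [cutA_go, cutB_flush, cutB_merge]
    rw [PySem.List.slice_natCast]
    have htk : (block.drop s).take (block.length - s) = block.drop s := by
      apply List.take_of_length_le; simp
    rw [htk]
    have hlen : (block.drop s).length = block.length - s := by simp
    rw [hlen]
    have hss : block.length - (block.length - s) = s := by omega
    rw [hss]
    exact ⟨rfl, rfl⟩
  | w :: rest, k, s, sents, hsk, hkle, hdrop => by
    have hkn : k < block.length := by
      have := congrArg List.length hdrop; simp at this; omega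
    have hdrop1 : block.drop (k+1) = rest := by
      rw [← List.drop_drop, hdrop]; rfl
    obtain ⟨hempty, hsnoc⟩ := slice_snoc block w rest s k hsk hdrop
    have castk : ((k : Nat) : Int) + 1 = (((k+1 : Nat)) : Int) := by push_cast; ring
    by_cases hw : w ∈ p
    · rw [cutA_go, if_pos hw, cutB_flush, if_pos hw, flush_acc p rest [] _]
      simp only [List.nil_append]
      have hB : ∀ sents' : List (List String),
          (cutA_go block p rest (((k+1:Nat)):Int) (((k+1:Nat)):Int) sents' (sents'.length : Int)
            = ((((block.length - (cutB_flush p rest (PySem.List.slice block (some (((k+1:Nat)):Int)) (some (((k+1:Nat)):Int))) []).2.length : Nat)) : Int),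
               cutB_merge (cutB_flush p rest (PySem.List.slice block (some (((k+1:Nat)):Int)) (some (((k+1:Nat)):Int))) []).1 sents'))
          ∧ (cutB_flush p rest (PySem.List.slice block (some (((k+1:Nat)):Int)) (some (((k+1:Nat)):Int))) []).2
              = block.drop (block.length - (cutB_flush p rest (PySem.List.slice block (some (((k+1:Nat)):Int)) (some (((k+1:Nat)):Int))) []).2.length) :=
        fun sents' => go_eq block p rest (k+1) (k+1) sents' (le_refl _) (by omega) hdrop1
      simp only [hempty] at hB
      simp only [castk, hsnoc]
      refine ⟨?_, (hB sents).2⟩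
      simp only [List.singleton_append]
      rw [cutB_merge]
      by_cases hone : (PySem.List.slice block (some ((s:Nat):Int)) (some ((k:Nat):Int)) ++ [w]).length = 1
      · rw [if_pos hone, if_pos hone]
        have hcur : PySem.List.slice block (some ((s:Nat):Int)) (some ((k:Nat):Int)) = [] := by
          apply List.eq_nil_of_length_eq_zero
          rw [List.length_append] at hone
          simp only [List.length_cons, List.length_nil] at hone
          omega
        rw [hcur]
        simp only [List.nil_append, List.headD_cons]
        by_cases hs : sents = []
        · subst hs
          rw [if_neg (by norm_num), if_neg (by simp)]
          exact (hB []).1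
        · have h1 : (sents.length : Int) ≥ 1 := by
            have := List.length_pos_iff.mpr hs; omega
          rw [if_pos h1, if_pos hs]
          have hidx : ((sents.length : Int) - 1).toNat = sents.length - 1 := by omega
          rw [hidx, modify_last_eq [] _ sents hs]
          have hlen2 : ((sents.dropLast ++ [sents.getLastD [] ++ [w]]).length : Int)
              = (sents.length : Int) := by
            simp [List.length_dropLast]
            have := List.length_pos_iff.mpr hs; omega
          rw [← hlen2]
          exact (hB _).1
      · rw [if_neg hone, if_neg hone]
        have hlen2 : ((sents ++ [PySem.List.slice block (some ((s:Nat):Int)) (some ((k:Nat):Int)) ++ [w]]).length : Int)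
            = (sents.length : Int) + 1 := by simp
        rw [← hlen2]
        exact (hB _).1
    · rw [cutA_go, if_neg hw, cutB_flush, if_neg hw]
      simp only [castk]
      rw [← hsnoc]
      exact go_eq block p rest (k+1) s sents (by omega) (by omega) hdrop1

-- ===== VERDICT (by name: the statement is the Claim_ definition above) =====
theorem cut_sentence_spec : Claim_equal_cut_sentence := by
  intro block puncs_list _
  unfold Spec_cut_sentence cut_sentence cut_sentence_alt
  have h0 : PySem.List.slice block (some (((0:Nat)):Int)) (some (((0:Nat)):Int)) = [] := by
    rw [PySem.List.slice_natCast]; simp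
  obtain ⟨hmain, hcur⟩ := go_eq block puncs_list block 0 0 [] (le_refl 0) (by omega) (by simp)
  rw [h0] at hmain hcur
  have hmain' : cutA_go block puncs_list block 0 0 [] 0 =
      (((block.length - (cutB_flush puncs_list block [] []).2.length : Nat) : Int),
       cutB_merge (cutB_flush puncs_list block [] []).1 []) := by
    simpa using hmain
  rw [hmain']
  set L := (cutB_flush puncs_list block [] []).2.length with hL
  have hLle : L ≤ block.length := by
    have := congrArg List.length hcur
    simp [← hL] at this; omega
  by_cases hc : (cutB_flush puncs_list block [] []).2 = []
  · have hL0 : L = 0 := by rw [hL, hc]; rfl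
    rw [if_neg (by simp [hL0]), if_neg (by simp [hc])]
  · have hLpos : 0 < L := by
      rw [hL]; exact List.length_pos_iff.mpr hc
    rw [if_pos (show ((block.length - L : Nat) : Int) < (block.length : Int) from by exact_mod_cast Nat.sub_lt (by omega) hLpos), if_pos (by simp [hc])]
    rw [PySem.List.slice_from_natCast, ← hcur]
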